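-- pv_equiv track=rewrite | github.com/pypi-data/pypi-mirror-356 | packages/influenzanet.surveys/influenzanet_surveys-1.2.0.tar.gz/influenzanet_surveys-1.2.0/influenzanet/surveys/influenzanet/loader.py | reorder_dict
-- ===== SOURCE A (Python) =====
-- from typing import Dict, List, OrderedDict
--
-- def reorder_dict(data: Dict, fields:List[str]):
--     """
--     Reorder a dictionnary fields with a list of field to put as first fields
--     Fields in data not in field list are placed at the end
--     """
--     old_keys = list(data.keys())
--     new_keys = []
--     for field in fields:
--         if field in old_keys:
--            new_keys.append(field)
--            old_keys.remove(field)
--     new_keys += old_keys # Add old keys remaining at the end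
--     d = OrderedDict()
--     for field in new_keys:
--         d[field] = data[field]
--     return d
-- ===== SOURCE B (Python) =====
-- from typing import Dict, List, OrderedDict
--
-- def reorder_dict(data: Dict, fields: List[str]):
--     """Single stable sort of the keys by their position in `fields`
--     (keys not in `fields` get priority len(fields), keeping their
--     original relative order), then copy the values across."""
--     nf = len(fields)
--     keys = sorted(data, key=lambda k: fields.index(k) if k in fields else nf)
--     d = OrderedDict()
--     for k in keys:
--         d[k] = data[k]
--     return d
-- ===== Notes on version B (the rewrite author's own statement) =====
-- stated objective: idiomatic
-- what changed: A partitions the keys by destructively removing hit fields from a copy of the key list and appending the leftovers; B computes the whole order with one stable sort of the keys under the priority 'position in fields, else len(fields)'.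
import Mathlib
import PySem

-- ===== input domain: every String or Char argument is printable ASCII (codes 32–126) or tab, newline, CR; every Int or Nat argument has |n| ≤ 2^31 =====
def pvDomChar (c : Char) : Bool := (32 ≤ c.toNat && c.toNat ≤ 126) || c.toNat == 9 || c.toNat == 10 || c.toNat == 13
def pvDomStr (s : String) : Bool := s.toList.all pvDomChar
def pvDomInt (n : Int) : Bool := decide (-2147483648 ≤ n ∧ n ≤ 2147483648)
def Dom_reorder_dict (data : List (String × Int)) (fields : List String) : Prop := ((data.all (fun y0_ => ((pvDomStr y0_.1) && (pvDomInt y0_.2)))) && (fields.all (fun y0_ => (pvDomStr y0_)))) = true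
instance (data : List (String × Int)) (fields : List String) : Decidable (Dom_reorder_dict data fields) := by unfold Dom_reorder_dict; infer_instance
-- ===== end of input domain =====

-- B replaces A's remove-and-append partition of the keys by ONE stable sort of the
-- keys under the priority "position in `fields`, else len(fields)" (idiomatic; same cost).

-- ===== PORT A =====
def reorder_dict (data : List (String × Int)) (fields : List String) : List (String × Int) :=
  -- old_keys = list(data.keys()); the loop keeps (new_keys, old_keys) as its state
  let s := fields.foldl
    (fun (s : List String × List String) field =>
      if field ∈ s.2 then
        (s.1 ++ [field], (PySem.List.remove? s.2 field).getD s.2)  -- old_keys.remove(field); guarded, never ValueError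
      else s)
    ([], PySem.Dict.keys (PySem.Dict.mk data))
  let new_keys := s.1 ++ s.2
  -- d = OrderedDict(); for field in new_keys: d[field] = data[field]  (every field is a key of data, so no KeyError)
  (new_keys.foldl (fun d field => PySem.Dict.insert d field (PySem.Dict.getD (PySem.Dict.mk data) field 0))
    PySem.Dict.empty).items

-- ===== PORT B =====
-- fields.index(k) if k in fields else len(fields)
def pvPriority (fields : List String) (k : String) : Int :=
  match PySem.List.index? fields k with
  | some i => (i : Int)
  | none => PySem.List.len fields

def reorder_dict_alt (data : List (String × Int)) (fields : List String) : List (String × Int) :=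
  let keys := PySem.List.sorted (PySem.Dict.keys (PySem.Dict.mk data)) (fun k => pvPriority fields k)
  -- d = OrderedDict(); for k in keys: d[k] = data[k]
  (keys.foldl (fun d field => PySem.Dict.insert d field (PySem.Dict.getD (PySem.Dict.mk data) field 0))
    PySem.Dict.empty).items

-- ===== PRECONDITION & SPEC =====
-- `data` models a Python dict, whose keys are necessarily distinct; association lists with a
-- duplicated key do not correspond to any dict input of A, so they are outside Pre_.
def Pre_reorder_dict (data : List (String × Int)) (fields : List String) : Prop :=
  (data.map Prod.fst).Nodup
instance (data : List (String × Int)) (fields : List String) : Decidable (Pre_reorder_dict data fields) := by unfold Pre_reorder_dict; infer_instance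
def pvWitness_reorder_dict : (List (String × Int)) × List String := ([("a", 1), ("b", 2), ("c", 3)], ["c", "a", "z"])

def Spec_reorder_dict (data : List (String × Int)) (fields : List String) (out : List (String × Int)) : Prop := out = reorder_dict_alt data fields
instance (data : List (String × Int)) (fields : List String) (out : List (String × Int)) : Decidable (Spec_reorder_dict data fields out) := by unfold Spec_reorder_dict; infer_instance

-- ===== CLAIM (what is proved, stated in full; the proofs are below) =====
def Claim_equal_reorder_dict : Prop := ∀ (data : List (String × Int)) (fields : List String), Dom_reorder_dict data fields → Pre_reorder_dict data fields → Spec_reorder_dict data fields (reorder_dict data fields)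

-- ===== LEMMAS AND PROOFS =====

-- proof-only mirrors of A's loop state: the fields hit (in hit order) and the keys left over
def pvHits : List String → List String → List String
  | [], _ => []
  | f :: fs, old => if f ∈ old then f :: pvHits fs (old.erase f) else pvHits fs old

def pvResid : List String → List String → List String
  | [], old => old
  | f :: fs, old => if f ∈ old then pvResid fs (old.erase f) else pvResid fs old

theorem A_loop (fields : List String) : ∀ (new old : List String),
    fields.foldl
      (fun (s : List String × List String) field =>
        if field ∈ s.2 then (s.1 ++ [field], (PySem.List.remove? s.2 field).getD s.2) else s)
      (new, old)
    = (new ++ pvHits fields old, pvResid fields old) := by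
  induction fields with
  | nil => intro new old; simp [pvHits, pvResid]
  | cons f fs ih =>
    intro new old
    simp only [List.foldl_cons, pvHits, pvResid]
    by_cases h : f ∈ old
    · rw [if_pos h, if_pos h, if_pos h, PySem.List.remove?_eq_some_erase old f h]
      simp only [Option.getD_some]
      rw [ih]
      simp
    · rw [if_neg h, if_neg h, if_neg h, ih]

theorem mem_pvHits (fields : List String) : ∀ (old : List String) (x : String),
    x ∈ pvHits fields old ↔ x ∈ fields ∧ x ∈ old := by
  induction fields with
  | nil => simp [pvHits]
  | cons f fs ih =>
    intro old x
    simp only [pvHits]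
    by_cases h : f ∈ old
    · rw [if_pos h]
      by_cases hx : x = f
      · subst hx; simp [h]
      · simp only [List.mem_cons, hx, false_or, ih, List.mem_erase_of_ne hx]
    · rw [if_neg h, ih]
      constructor
      · rintro ⟨h1, h2⟩; exact ⟨List.mem_cons_of_mem _ h1, h2⟩
      · rintro ⟨h1, h2⟩
        rcases List.mem_cons.mp h1 with rfl | h1
        · exact absurd h2 h
        · exact ⟨h1, h2⟩

theorem nodup_pvHits (fields : List String) : ∀ (old : List String), old.Nodup →
    (pvHits fields old).Nodup := by
  induction fields with
  | nil => intro old _; simp [pvHits]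
  | cons f fs ih =>
    intro old hnd
    simp only [pvHits]
    by_cases h : f ∈ old
    · rw [if_pos h]
      refine List.nodup_cons.mpr ⟨?_, ih _ (hnd.erase f)⟩
      intro hmem
      have := ((mem_pvHits fs _ f).mp hmem).2
      exact (((List.Nodup.mem_erase_iff hnd).mp this).1) rfl
    · rw [if_neg h]; exact ih _ hnd

theorem pvPriority_nonneg (fields : List String) (x : String) : 0 ≤ pvPriority fields x := by
  unfold pvPriority
  cases PySem.List.index? fields x with
  | none => simp [PySem.List.len_eq]
  | some i => simp

theorem pvPriority_cons_of_ne (f : String) (fs : List String) (x : String) (h : f ≠ x) :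
    pvPriority (f :: fs) x = pvPriority fs x + 1 := by
  unfold pvPriority
  rw [PySem.List.index?_cons_of_ne fs h]
  cases hi : PySem.List.index? fs x with
  | none => simp [PySem.List.len_eq]
  | some i => simp

theorem pairwise_pvHits (fields : List String) : ∀ (old : List String), old.Nodup →
    (pvHits fields old).Pairwise (fun a b => pvPriority fields a < pvPriority fields b) := by
  induction fields with
  | nil => intro old _; simp [pvHits]
  | cons f fs ih =>
    intro old hnd
    have lift : ∀ y, y ≠ f → pvPriority (f :: fs) y = pvPriority fs y + 1 := by
      intro y hy; exact pvPriority_cons_of_ne f fs y (Ne.symm hy)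
    simp only [pvHits]
    by_cases h : f ∈ old
    · rw [if_pos h]
      refine List.pairwise_cons.mpr ⟨?_, ?_⟩
      · intro b hb
        have hbo := ((mem_pvHits fs _ b).mp hb).2
        have hbf : b ≠ f := ((List.Nodup.mem_erase_iff hnd).mp hbo).1
        have h0 : pvPriority (f :: fs) f = 0 := by
          unfold pvPriority; rw [PySem.List.index?_cons_self]; simp
        rw [h0, lift b hbf]
        have := pvPriority_nonneg fs b
        omega
      · refine List.Pairwise.imp_of_mem ?_ (ih _ (hnd.erase f))
        intro a b ha hb hab
        have haf : a ≠ f := ((List.Nodup.mem_erase_iff hnd).mp ((mem_pvHits fs _ a).mp ha).2).1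
        have hbf : b ≠ f := ((List.Nodup.mem_erase_iff hnd).mp ((mem_pvHits fs _ b).mp hb).2).1
        rw [lift a haf, lift b hbf]; omega
    · rw [if_neg h]
      refine List.Pairwise.imp_of_mem ?_ (ih _ hnd)
      intro a b ha hb hab
      have haf : a ≠ f := fun e => h (e ▸ ((mem_pvHits fs _ a).mp ha).2)
      have hbf : b ≠ f := fun e => h (e ▸ ((mem_pvHits fs _ b).mp hb).2)
      rw [lift a haf, lift b hbf]; omega

theorem pvPriority_le (fields : List String) (x : String) :
    pvPriority fields x ≤ PySem.List.len fields := by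
  unfold pvPriority
  cases hi : PySem.List.index? fields x with
  | none => simp
  | some i =>
    obtain ⟨hk, -, -⟩ := PySem.List.getElem_of_index?_eq_some hi
    simp [PySem.List.len_eq]
    omega

theorem pvPriority_lt_iff (fields : List String) (x : String) :
    pvPriority fields x < PySem.List.len fields ↔ x ∈ fields := by
  unfold pvPriority
  cases hi : PySem.List.index? fields x with
  | none =>
    simp only [lt_self_iff_false, false_iff]
    exact (PySem.List.index?_eq_none_iff fields x).mp hi
  | some i =>
    obtain ⟨hk, hx, -⟩ := PySem.List.getElem_of_index?_eq_some hi
    simp only [PySem.List.len_eq]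
    constructor
    · intro _; exact hx ▸ List.getElem_mem hk
    · intro _; omega

theorem pvResid_eq_filter (fields : List String) : ∀ (old : List String), old.Nodup →
    pvResid fields old = old.filter (fun k => decide (k ∉ fields)) := by
  induction fields with
  | nil => intro old _; simp [pvResid]
  | cons f fs ih =>
    intro old hnd
    simp only [pvResid]
    by_cases h : f ∈ old
    · rw [if_pos h, ih _ (hnd.erase f), List.Nodup.erase_eq_filter hnd f, List.filter_filter]
      refine List.filter_congr ?_
      intro x _
      by_cases hx : x = f
      · subst hx; simp
      · simp [hx]
    · rw [if_neg h, ih _ hnd]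
      refine List.filter_congr ?_
      intro x hx
      have hxf : x ≠ f := fun e => h (e ▸ hx)
      simp [hxf]

theorem ins_append_high {α : Type} (before : α → α → Bool) (x : α) (L H : List α)
    (h : ∀ y ∈ H, before x y = true) :
    PySem.List.insertBy before x (L ++ H) = PySem.List.insertBy before x L ++ H := by
  induction L with
  | nil =>
    cases H with
    | nil => rfl
    | cons y ys =>
      simp only [List.nil_append, PySem.List.insertBy]
      rw [if_pos (h y (List.mem_cons_self))]
      rfl
  | cons a L' ihL =>
    simp only [List.cons_append, PySem.List.insertBy]
    by_cases hb : before x a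
    · rw [if_pos hb, if_pos hb]; simp
    · rw [if_neg hb, if_neg hb, ihL]; simp

theorem fold_ins_split (key : String → Int) (nf : Int) : ∀ (ks L H : List String),
    (∀ y ∈ L, key y < nf) → (∀ y ∈ H, key y = nf) → (∀ x ∈ ks, key x ≤ nf) →
    ks.foldl (fun acc x => PySem.List.insertBy (fun a b => decide (key a < key b)) x acc) (L ++ H)
      = (ks.filter (fun x => decide (key x < nf))).foldl
          (fun acc x => PySem.List.insertBy (fun a b => decide (key a < key b)) x acc) L
        ++ (H ++ ks.filter (fun x => decide (key x = nf))) := by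
  intro ks
  induction ks with
  | nil =>
    intro L H _ _ _
    simp
  | cons x ks ih =>
    intro L H hL hH hks
    simp only [List.foldl_cons, List.filter_cons]
    by_cases hx : key x < nf
    · rw [ins_append_high _ x L H (fun y hy => by
        simp only [decide_eq_true_eq]
        rw [hH y hy]; exact hx)]
      rw [show decide (key x < nf) = true from by simp [hx],
          show decide (key x = nf) = false from by simp; omega]
      exact ih (PySem.List.insertBy _ x L) H
        (fun y hy => by
          rcases (PySem.List.mem_insertBy _ x y L).mp hy with rfl | hy
          · exact hx
          · exact hL y hy)
        hH (fun z hz => hks z (List.mem_cons_of_mem _ hz))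
    · have hxe : key x = nf := le_antisymm (hks x List.mem_cons_self) (not_lt.mp hx)
      rw [PySem.List.insertBy_of_forall_not_before _ x (L ++ H) (fun y hy => by
        rcases List.mem_append.mp hy with hy | hy
        · have := hL y hy; simp; omega
        · have := hH y hy; simp; omega)]
      rw [show decide (key x < nf) = false from by simp [hx],
          show decide (key x = nf) = true from by simp [hxe]]
      rw [List.append_assoc]
      rw [ih L (H ++ [x]) hL (fun y hy => by
        rcases List.mem_append.mp hy with hy | hy
        · exact hH y hy
        · simp at hy; subst hy; exact hxe)
        (fun z hz => hks z (List.mem_cons_of_mem _ hz))]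
      simp

theorem keys_eq (fields ks : List String) (hnd : ks.Nodup) :
    pvHits fields ks ++ pvResid fields ks
      = PySem.List.sorted ks (fun k => pvPriority fields k) := by
  rw [PySem.List.sorted_eq_foldl_insertBy]
  have h := fold_ins_split (fun k => pvPriority fields k) (PySem.List.len fields) ks [] []
    (by simp) (by simp) (fun x _ => pvPriority_le fields x)
  simp only [List.append_nil, List.nil_append] at h
  rw [h]
  congr 1
  · -- front part: the hits are exactly the sorted field-keys
    rw [← PySem.List.sorted_eq_foldl_insertBy]
    refine (PySem.List.sorted_eq_of_perm_of_pairwise_lt _ _ _ ?_ (pairwise_pvHits fields ks hnd)).symm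
    refine List.perm_of_nodup_nodup_toFinset_eq (nodup_pvHits fields ks hnd)
      (hnd.filter _) ?_
    ext x
    simp only [List.mem_toFinset, mem_pvHits, List.mem_filter, decide_eq_true_eq,
      pvPriority_lt_iff]
    tauto
  · -- back part: the residue is exactly the non-field keys, in order
    rw [pvResid_eq_filter fields ks hnd]
    refine List.filter_congr ?_
    intro x _
    have hle := pvPriority_le fields x
    have hlt := pvPriority_lt_iff fields x
    by_cases hx : x ∈ fields
    · simp only [hx, not_true_eq_false, decide_false]
      simp only [hx, iff_true] at hlt
      simp only [PySem.List.len_eq] at hle hlt ⊢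
      simp; omega
    · simp only [hx, not_false_eq_true, decide_true]
      simp only [hx, iff_false, not_lt] at hlt
      simp only [PySem.List.len_eq] at hle hlt ⊢
      simp; omega

-- ===== VERDICT (by name: the statement is the Claim_ definition above) =====
theorem reorder_dict_spec : Claim_equal_reorder_dict := by
  intro data fields _ hpre
  have hnd : (PySem.Dict.keys (PySem.Dict.mk data)).Nodup := hpre
  unfold Spec_reorder_dict reorder_dict reorder_dict_alt
  simp only [A_loop, List.nil_append]
  rw [keys_eq fields _ hnd]
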